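-- pv_equiv track=rewrite | github.com/TiiAyyLuvBear/Diffie-Hellman | implementation/project3/compare_results.py | int_to_reversed_hex
-- ===== SOURCE A (Python) =====
-- def int_to_reversed_hex(num):
--     """
--     Convert integer to reversed hex string
--     Mimics C++ toReversedHex logic:
--     1. Convert number to bytes (little-endian)
--     2. Convert each byte to hex (always 2 digits)
--     3. Concatenate all hex pairs
--     4. Remove leading zeros (but keep at least "00")
--     5. Result is already in reversed format
--     """
--     if num == 0:
--         return "0"
--
--     # Convert to bytes and build hex string like C++
--     bytes_list = []
--     temp = num
--     while temp > 0:
--         bytes_list.append(temp & 0xFF)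
--         temp >>= 8
--
--     # Build hex string from highest byte to lowest (like C++)
--     hex_str = ""
--     for i in range(len(bytes_list) - 1, -1, -1):
--         b = bytes_list[i]
--         hex_str += format((b >> 4) & 0xF, 'X')
--         hex_str += format(b & 0xF, 'X')
--
--     if not hex_str:
--         return "0"
--
--     # Remove leading zeros (but keep at least one digit)
--     hex_str = hex_str.lstrip('0')
--     if not hex_str:
--         return "0"
--
--     # Reverse to get reversed hex format
--     reversed_hex = hex_str[::-1]
--
--     # Remove trailing zeros from reversed hex (which were leading zeros in normal hex)
--     # Example: "0009A" reversed is "A9000" -> should be "A9"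
--     reversed_hex = reversed_hex.rstrip('0')
--     if not reversed_hex:
--         return "0"
--
--     return reversed_hex
-- ===== SOURCE B (Python) =====
-- def int_to_reversed_hex(num):
--     # num <= 0 (zero, or negatives, whose byte loop in A runs zero times) -> "0"
--     if num <= 0:
--         return "0"
--     digits = []
--     t = num
--     while t > 0:
--         t, r = divmod(t, 16)
--         digits.append("0123456789ABCDEF"[r])
--     # divmod yields least-significant digit first: already reversed-hex order
--     return "".join(digits)
-- ===== Notes on version B (the rewrite author's own statement) =====
-- stated objective: simpler
-- what changed: Replaces A's byte-extraction (bit masks and shifts), forward big-endian hex build over descending indices, lstrip, reversal and rstrip by a single base-16 divmod loop that collects the digits directly in reversed order, joined once.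
import Mathlib
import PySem

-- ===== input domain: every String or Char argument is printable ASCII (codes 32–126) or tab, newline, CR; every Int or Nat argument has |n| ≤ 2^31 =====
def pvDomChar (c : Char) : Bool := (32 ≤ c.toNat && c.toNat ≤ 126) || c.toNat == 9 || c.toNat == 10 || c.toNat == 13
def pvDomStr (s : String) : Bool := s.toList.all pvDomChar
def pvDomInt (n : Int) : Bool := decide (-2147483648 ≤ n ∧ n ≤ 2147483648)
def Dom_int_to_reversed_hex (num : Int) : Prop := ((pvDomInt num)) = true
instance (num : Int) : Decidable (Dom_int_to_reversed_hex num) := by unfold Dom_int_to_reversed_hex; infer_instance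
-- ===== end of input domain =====

-- B replaces A's byte/nibble extraction, big-endian build, lstrip, reversal and rstrip
-- by one base-16 divmod loop collecting the digits directly in reversed order (simpler).

-- ===== PORT A =====

-- termination helper for A's byte loop (cited in decreasing_by)
theorem pvShift8ToNat_lt (t : Int) (h : 0 < t) : (t >>> (8:Nat)).toNat < t.toNat := by
  have hn : t = ((t.toNat : Nat) : Int) := by omega
  rw [hn]
  have hc : ((t.toNat : Int) >>> (8:Nat)) = ((t.toNat >>> 8 : Nat) : Int) := by simp
  rw [hc, Int.toNat_natCast, Int.toNat_natCast, Nat.shiftRight_eq_div_pow]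
  exact Nat.div_lt_self (by omega) (by norm_num)

-- termination helper for B's digit loop (cited in decreasing_by)
theorem pvFloordiv16_lt (t : Int) (h : 0 < t) :
    (PySem.Int.floordiv t 16).toNat < t.toNat := by
  rw [PySem.Int.floordiv_eq_ediv_of_pos (by omega : (0:Int) < 16)]
  omega

-- format(x, 'X') for 0 ≤ x < 16: the single uppercase hex digit character (exact on that range)
def pvFmtX (x : Int) : Char :=
  if x < 10 then Char.ofNat (48 + x.toNat) else Char.ofNat (55 + x.toNat)

-- while temp > 0: bytes_list.append(temp & 0xFF); temp >>= 8
def pvBytesLoop (temp : Int) : List Int :=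
  if 0 < temp then PySem.Int.band temp 255 :: pvBytesLoop (temp >>> (8:Nat)) else []
termination_by temp.toNat
decreasing_by exact pvShift8ToNat_lt temp (by omega)

-- port of A; the hex string is handled as List Char (PySem convention), built exactly as A builds it
def int_to_reversed_hex (num : Int) : String :=
  if num == 0 then "0"
  else
    let bytes_list := pvBytesLoop num
    -- for i in range(len(bytes_list)-1, -1, -1): hex_str += format((b>>4)&0xF,'X'); hex_str += format(b&0xF,'X')
    let hex_str : List Char :=
      (PySem.List.pyRange ((bytes_list.length : Int) - 1) (-1) (-1)).foldl
        (fun s i =>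
          let b := PySem.List.pyGetD bytes_list i 0   -- bytes_list[i]; i always in range here
          s ++ [pvFmtX (PySem.Int.band (b >>> (4:Nat)) 15)] ++ [pvFmtX (PySem.Int.band b 15)]) []
    if hex_str.isEmpty then "0"
    else
      let hex_str₂ := hex_str.dropWhile (· == '0')          -- hex_str.lstrip('0')
      if hex_str₂.isEmpty then "0"
      else
        let reversed_hex := hex_str₂.reverse                 -- hex_str[::-1]
        let reversed_hex₂ := (reversed_hex.reverse.dropWhile (· == '0')).reverse  -- .rstrip('0')
        if reversed_hex₂.isEmpty then "0" else String.ofList reversed_hex₂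

-- ===== PORT B =====

-- while t > 0: t, r = divmod(t, 16); digits.append("0123456789ABCDEF"[r])
def pvDigitsLoop (t : Int) : List Char :=
  if 0 < t then
    PySem.List.pyGetD "0123456789ABCDEF".toList (PySem.Int.mod t 16) ' '
      :: pvDigitsLoop (PySem.Int.floordiv t 16)
  else []
termination_by t.toNat
decreasing_by exact pvFloordiv16_lt t (by omega)

def int_to_reversed_hex_alt (num : Int) : String :=
  if num ≤ 0 then "0" else String.ofList (pvDigitsLoop num)

-- ===== PRECONDITION & SPEC =====
def Spec_int_to_reversed_hex (num : Int) (out : String) : Prop := out = int_to_reversed_hex_alt num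
instance (num : Int) (out : String) : Decidable (Spec_int_to_reversed_hex num out) := by unfold Spec_int_to_reversed_hex; infer_instance

-- ===== CLAIM (what is proved, stated in full; the proofs are below) =====
def Claim_equal_int_to_reversed_hex : Prop := ∀ (num : Int), Dom_int_to_reversed_hex num → Spec_int_to_reversed_hex num (int_to_reversed_hex num)

-- ===== LEMMAS AND PROOFS =====

-- base-16 digits of n, least significant first (the mathematical common form)
def pvNibs (n : Nat) : List Nat :=
  if n = 0 then [] else n % 16 :: pvNibs (n / 16)
decreasing_by exact Nat.div_lt_self (by omega) (by omega)

-- base-256 digits of n, least significant first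
def pvBytesN (n : Nat) : List Nat :=
  if n = 0 then [] else n % 256 :: pvBytesN (n / 256)
decreasing_by exact Nat.div_lt_self (by omega) (by omega)

theorem pvNibs_zero : pvNibs 0 = [] := by rw [pvNibs, if_pos rfl]
theorem pvNibs_pos (n : Nat) (h : n ≠ 0) : pvNibs n = n % 16 :: pvNibs (n / 16) := by
  rw [pvNibs, if_neg h]
theorem pvBytesN_zero : pvBytesN 0 = [] := by rw [pvBytesN, if_pos rfl]
theorem pvBytesN_pos (n : Nat) (h : n ≠ 0) : pvBytesN n = n % 256 :: pvBytesN (n / 256) := by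
  rw [pvBytesN, if_neg h]

def pvDChar (d : Nat) : Char := if d < 10 then Char.ofNat (48 + d) else Char.ofNat (55 + d)

theorem pvBytesLoop_natCast (n : Nat) :
    pvBytesLoop (n : Int) = (pvBytesN n).map (fun m : Nat => ((m : Nat) : Int)) := by
  induction n using Nat.strong_induction_on with
  | _ n ih =>
    rw [pvBytesLoop]
    by_cases h0 : n = 0
    · simp [h0, pvBytesN_zero]
    · have hpos : 0 < (n : Int) := by omega
      have hsh : ((n : Int) >>> (8:Nat)) = ((n >>> 8 : Nat) : Int) := by simp
      have hband : PySem.Int.band (n : Int) 255 = ((n % 256 : Nat) : Int) := by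
        rw [PySem.Int.band_of_nonneg (by omega) (by omega)]
        have h255 : ((255:Int)).toNat = 255 := rfl
        have hand : n &&& 255 = n % 256 := by
          have := Nat.and_two_pow_sub_one_eq_mod n 8
          simpa using this
        simp [h255, hand]
      rw [if_pos hpos, hsh, hband,
        ih (n >>> 8) (by
          rw [Nat.shiftRight_eq_div_pow]
          exact Nat.div_lt_self (by omega) (by omega)),
        Nat.shiftRight_eq_div_pow, pvBytesN_pos n h0]
      simp

theorem pvDigitsLoop_natCast (n : Nat) :
    pvDigitsLoop (n : Int) = (pvNibs n).map pvDChar := by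
  induction n using Nat.strong_induction_on with
  | _ n ih =>
    rw [pvDigitsLoop]
    by_cases h0 : n = 0
    · simp [h0, pvNibs_zero]
    · have hpos : 0 < (n : Int) := by omega
      have hmod : PySem.Int.mod (n : Int) 16 = ((n % 16 : Nat) : Int) := by
        exact_mod_cast PySem.Int.mod_natCast n 16
      have hdiv : PySem.Int.floordiv (n : Int) 16 = ((n / 16 : Nat) : Int) := by
        exact_mod_cast PySem.Int.floordiv_natCast n 16
      have hget : PySem.List.pyGetD "0123456789ABCDEF".toList ((n % 16 : Nat) : Int) ' '
          = pvDChar (n % 16) := by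
        rw [PySem.List.pyGetD_natCast]
        have hlt : n % 16 < 16 := Nat.mod_lt _ (by omega)
        interval_cases h : (n % 16) <;> rfl
      rw [if_pos hpos, hmod, hdiv, hget,
        ih (n / 16) (Nat.div_lt_self (by omega) (by omega)), pvNibs_pos n h0]
      simp

-- A's concatenated per-byte nibbles, LSB-first, equal B's digit list plus zero padding
theorem pvLE_eq (n : Nat) :
    ∃ k, (pvBytesN n).flatMap (fun m => [m % 16, m / 16 % 16]) = pvNibs n ++ List.replicate k 0 := by
  induction n using Nat.strong_induction_on with
  | _ n ih =>
    by_cases h0 : n = 0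
    · exact ⟨0, by simp [h0, pvBytesN_zero, pvNibs_zero]⟩
    · rw [pvBytesN_pos n h0, List.flatMap_cons]
      have e1 : n % 256 % 16 = n % 16 := Nat.mod_mod_of_dvd n (by norm_num)
      have e2 : n % 256 / 16 % 16 = n / 16 % 16 := by omega
      have e3 : n / 256 = n / 16 / 16 := by omega
      by_cases h16 : n / 16 = 0
      · refine ⟨1, ?_⟩
        have h256 : n / 256 = 0 := by omega
        rw [h256, pvBytesN_zero, pvNibs_pos n h0, pvNibs, if_pos h16]
        simp [e1, e2, h16]
      · obtain ⟨k, hk⟩ := ih (n / 256) (Nat.div_lt_self (by omega) (by omega))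
        refine ⟨k, ?_⟩
        rw [hk, pvNibs_pos n h0, pvNibs_pos (n / 16) h16, e3]
        simp [e1, e2]

theorem pvNibs_last_ne_zero (n : Nat) (h : n ≠ 0) :
    (pvNibs n).getLast? ≠ some 0 := by
  induction n using Nat.strong_induction_on with
  | _ n ih =>
    rw [pvNibs_pos n h]
    by_cases h16 : n / 16 = 0
    · rw [pvNibs, if_pos h16]
      simp
      omega
    · rw [pvNibs_pos _ h16, List.getLast?_cons_cons, ← pvNibs_pos _ h16]
      exact ih (n / 16) (Nat.div_lt_self (by omega) (by omega)) h16

theorem pvNibs_lt (n : Nat) : ∀ d ∈ pvNibs n, d < 16 := by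
  induction n using Nat.strong_induction_on with
  | _ n ih =>
    by_cases h0 : n = 0
    · simp [h0, pvNibs_zero]
    · rw [pvNibs_pos n h0]
      intro d hd
      rcases List.mem_cons.mp hd with hd | hd
      · exact hd ▸ Nat.mod_lt _ (by omega)
      · exact ih (n / 16) (Nat.div_lt_self (by omega) (by omega)) d hd

theorem pvDChar_ne_zero (d : Nat) (hd : d < 16) (h : d ≠ 0) : (pvDChar d == '0') = false := by
  interval_cases d <;> simp_all <;> decide

theorem pvMap_getD_range {α : Type} (xs : List α) (d : α) :
    List.map (fun i => xs.getD i d) (List.range xs.length) = xs := by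
  apply List.ext_getElem
  · simp
  · intro i h1 h2
    simp [List.getD_eq_getElem?_getD, h2]

-- the descending-index build loop is a flatMap over the reversed list
theorem pvFoldDesc {α : Type} (xs : List α) (d : α) (g : α → List Char) :
    (PySem.List.pyRange ((xs.length : Int) - 1) (-1) (-1)).foldl
      (fun s i => s ++ g (PySem.List.pyGetD xs i d)) [] = xs.reverse.flatMap g := by
  rw [PySem.List.pyRange_neg_one_eq_reverse]
  have e2 : ((xs.length : Int) - 1 + 1) = (xs.length : Int) := by ring
  rw [show ((-1 : Int) + 1) = 0 by ring, e2, PySem.List.pyRange_zero_natCast,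
    ← List.map_reverse, List.foldl_map, PySem.List.foldl_append_eq_flatMap]
  rw [List.nil_append,
    show (fun y : Nat => g (PySem.List.pyGetD xs ((y : Nat) : Int) d))
        = (fun y : Nat => g (xs.getD y d)) from
      funext fun y => by rw [PySem.List.pyGetD_natCast],
    ← List.flatMap_map (fun i => xs.getD i d) g,
    List.map_reverse, pvMap_getD_range]

theorem pvDropWhile_replicate_append (k : Nat) (l : List Char) :
    (List.replicate k '0' ++ l).dropWhile (· == '0') = l.dropWhile (· == '0') := by
  induction k with
  | zero => simp
  | succ k ih => simp [List.replicate_succ, ih]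

theorem pvDropWhile_of_head (c : Char) (l : List Char) (h : l.head? = some c)
    (hc : (c == '0') = false) : l.dropWhile (· == '0') = l := by
  cases l with
  | nil => rfl
  | cons a t =>
    simp at h
    subst h
    rw [List.dropWhile_cons_of_neg (by simp_all)]

theorem pvFmtX_natCast (k : Nat) : pvFmtX ((k : Nat) : Int) = pvDChar k := by
  by_cases h : k < 10
  · rw [pvFmtX, pvDChar, if_pos (by exact_mod_cast h), if_pos h, Int.toNat_natCast]
  · rw [pvFmtX, pvDChar, if_neg (by exact_mod_cast h), if_neg h, Int.toNat_natCast]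

-- one byte's two hex characters, in Nat terms
theorem pvByte_pair (m : Nat) :
    [pvFmtX (PySem.Int.band (((m : Nat) : Int) >>> (4:Nat)) 15),
     pvFmtX (PySem.Int.band ((m : Nat) : Int) 15)]
      = [pvDChar (m / 16 % 16), pvDChar (m % 16)] := by
  have hsh : (((m : Nat) : Int) >>> (4:Nat)) = ((m >>> 4 : Nat) : Int) := by simp
  have hband : ∀ a : Nat, PySem.Int.band ((a : Nat) : Int) 15 = ((a &&& 15 : Nat) : Int) := by
    intro a
    rw [PySem.Int.band_of_nonneg (by omega) (by omega)]
    simp [show ((15:Int)).toNat = 15 from rfl]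
  have hb1 := hband (m >>> 4)
  have hb2 := hband m
  have h15 : ∀ a : Nat, a &&& 15 = a % 16 := by
    intro a
    have := Nat.and_two_pow_sub_one_eq_mod a 4
    simpa using this
  rw [hsh, hb1, hb2, pvFmtX_natCast, pvFmtX_natCast, h15, h15,
    Nat.shiftRight_eq_div_pow]

theorem pvFoldHex (bs : List Int) :
    (PySem.List.pyRange ((bs.length : Int) - 1) (-1) (-1)).foldl
      (fun s i =>
        s ++ [pvFmtX (PySem.Int.band ((PySem.List.pyGetD bs i 0) >>> (4:Nat)) 15)]
          ++ [pvFmtX (PySem.Int.band (PySem.List.pyGetD bs i 0) 15)]) []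
      = bs.reverse.flatMap
          (fun b : Int => [pvFmtX (PySem.Int.band (b >>> (4:Nat)) 15), pvFmtX (PySem.Int.band b 15)]) := by
  rw [← pvFoldDesc bs 0
    (fun b : Int => [pvFmtX (PySem.Int.band (b >>> (4:Nat)) 15), pvFmtX (PySem.Int.band b 15)])]
  apply PySem.List.foldl_congr_mem
  intro acc i _
  rw [List.append_assoc]
  rfl

-- A's hex character string for a positive n, as zero padding before B's reversed digits
theorem pvHexChain (n k : Nat)
    (hLE : (pvBytesN n).flatMap (fun m => [m % 16, m / 16 % 16])
            = pvNibs n ++ List.replicate k 0) :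
    ((pvBytesN n).map (fun m : Nat => ((m : Nat) : Int))).reverse.flatMap
        (fun b : Int => [pvFmtX (PySem.Int.band (b >>> (4:Nat)) 15), pvFmtX (PySem.Int.band b 15)])
      = List.replicate k '0' ++ (List.map pvDChar (pvNibs n)).reverse := by
  rw [← List.map_reverse, List.flatMap_map]
  have h1 : (fun m : Nat =>
      [pvFmtX (PySem.Int.band (((m : Nat) : Int) >>> (4:Nat)) 15),
       pvFmtX (PySem.Int.band ((m : Nat) : Int) 15)])
      = fun m : Nat => [pvDChar (m / 16 % 16), pvDChar (m % 16)] := funext pvByte_pair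
  rw [h1]
  have h2 : (pvBytesN n).reverse.flatMap (fun m => [pvDChar (m / 16 % 16), pvDChar (m % 16)])
      = ((pvBytesN n).flatMap (fun m => [pvDChar (m % 16), pvDChar (m / 16 % 16)])).reverse := by
    rw [List.reverse_flatMap]
    simp [Function.comp_def]
  rw [h2]
  have h3 : (pvBytesN n).flatMap (fun m => [pvDChar (m % 16), pvDChar (m / 16 % 16)])
      = List.map pvDChar ((pvBytesN n).flatMap (fun m => [m % 16, m / 16 % 16])) := by
    rw [List.map_flatMap]
    rfl
  rw [h3, hLE, List.map_append, List.map_replicate,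
    show pvDChar 0 = '0' from rfl, List.reverse_append, List.reverse_replicate]

-- ===== VERDICT (by name: the statement is the Claim_ definition above) =====
theorem int_to_reversed_hex_spec : Claim_equal_int_to_reversed_hex := by
  intro num _
  show int_to_reversed_hex num = int_to_reversed_hex_alt num
  by_cases hle : num ≤ 0
  · -- num ≤ 0: both return "0"
    rw [int_to_reversed_hex_alt, if_pos hle]
    by_cases h0 : num = 0
    · rw [int_to_reversed_hex, if_pos (by simp [h0])]
    · have hb : pvBytesLoop num = [] := by rw [pvBytesLoop, if_neg (by omega)]
      rw [int_to_reversed_hex, if_neg (by simp [h0])]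
      simp only [hb]
      rw [show PySem.List.pyRange ((([] : List Int).length : Int) - 1) (-1) (-1) = [] from by decide]
      simp
  · -- num > 0
    have hpos : 0 < num := by omega
    obtain ⟨n, rfl⟩ : ∃ n : Nat, num = ((n : Nat) : Int) := ⟨num.toNat, by omega⟩
    have h0 : n ≠ 0 := by omega
    obtain ⟨k, hLE⟩ := pvLE_eq n
    have hnibs_ne : pvNibs n ≠ [] := by rw [pvNibs_pos n h0]; simp
    obtain ⟨d, hd⟩ : ∃ d, (pvNibs n).getLast? = some d := by
      cases hgl : (pvNibs n).getLast? with
      | none => exact absurd (List.getLast?_eq_none_iff.mp hgl) hnibs_ne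
      | some d => exact ⟨d, rfl⟩
    have hd16 : d < 16 := pvNibs_lt n d (List.mem_of_getLast? hd)
    have hdne : d ≠ 0 := fun h => pvNibs_last_ne_zero n h0 (by rw [hd, h])
    have hLne : List.map pvDChar (pvNibs n) ≠ [] := by simp [hnibs_ne]
    have hhead : (List.map pvDChar (pvNibs n)).reverse.head? = some (pvDChar d) := by
      rw [List.head?_reverse, List.getLast?_map, hd]; rfl
    have hdw : (List.map pvDChar (pvNibs n)).reverse.dropWhile (· == '0')
        = (List.map pvDChar (pvNibs n)).reverse :=
      pvDropWhile_of_head (pvDChar d) _ hhead (pvDChar_ne_zero d hd16 hdne)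
    have hrevne : (List.map pvDChar (pvNibs n)).reverse ≠ [] := by simp [hnibs_ne]
    -- A side
    rw [int_to_reversed_hex, if_neg (by simp [h0])]
    simp only [pvBytesLoop_natCast n, pvFoldHex, pvHexChain n k hLE,
      pvDropWhile_replicate_append, hdw, List.reverse_reverse]
    rw [if_neg (by simp [hnibs_ne]), if_neg (by simp [hnibs_ne]), if_neg (by simp [hnibs_ne])]
    -- B side
    rw [int_to_reversed_hex_alt, if_neg (by omega), pvDigitsLoop_natCast n]
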